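-- pv_equiv track=rewrite | github.com/jackyeung99/Applied_Algorithms | Assignment02/Assignment02_practical.py | arrangePerformers
-- ===== SOURCE A (Python) =====
-- from collections import deque
--
-- def arrangePerformers(nums):
--     sorted_nums = sorted(nums)
--
--     # flip
--     flipped = sorted_nums[::-1]
--
--     queue = deque()
--
--     # repeat the line process in reverse
--     for i in flipped:
--         if queue:
--             # bring back to front
--             queue.appendleft(queue.pop())
--
--         queue.appendleft(i)
--
--
--     return list(queue)
-- ===== SOURCE B (Python) =====
-- from collections import deque
--
-- def arrangePerformers(nums):
--     s = sorted(nums)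
--     n = len(s)
--     res = [0] * n
--     q = deque(range(n))
--     for v in s:
--         i = q.popleft()
--         res[i] = v
--         if q:
--             q.append(q.popleft())
--     return res
-- ===== Notes on version B (the rewrite author's own statement) =====
-- stated objective: alternative
-- what changed: B replaces A's reverse build (fold over the descending values, rotating a value deque right before each prepend) by the forward 'reveal' simulation: sort ascending, keep a queue of output indices, write each value at the popped index and rotate the next index to the back.
import Mathlib
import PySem

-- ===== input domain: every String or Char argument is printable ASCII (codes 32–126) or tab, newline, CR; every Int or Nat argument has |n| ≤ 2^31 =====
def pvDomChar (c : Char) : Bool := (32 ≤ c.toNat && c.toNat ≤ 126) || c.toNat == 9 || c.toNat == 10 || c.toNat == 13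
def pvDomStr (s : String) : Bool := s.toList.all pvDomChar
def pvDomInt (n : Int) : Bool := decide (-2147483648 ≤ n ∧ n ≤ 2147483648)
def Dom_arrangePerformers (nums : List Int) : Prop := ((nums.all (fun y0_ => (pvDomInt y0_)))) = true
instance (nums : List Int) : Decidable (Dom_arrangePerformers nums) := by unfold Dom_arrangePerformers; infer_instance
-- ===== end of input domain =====

-- B replaces A's reverse deque build by the forward "reveal" simulation: a queue of
-- output positions is rotated while the ascending values are written into a result array
-- (objective: alternative / idiomatic; same asymptotic cost).

-- ===== PORT A =====
-- queue.appendleft(queue.pop()): move the last element of the deque to the front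
def pvRotA (q : List Int) : List Int :=
  match q.getLast? with
  | none => q
  | some last => last :: q.dropLast

def arrangePerformers (nums : List Int) : List Int :=
  let sorted_nums := PySem.List.sorted nums (fun x => x) false
  let flipped := (PySem.List.slice? sorted_nums none none (-1)).getD []
  let queue := flipped.foldl (fun queue i =>
    let queue := if queue.isEmpty then queue else pvRotA queue
    i :: queue) []
  queue

-- ===== PORT B =====
-- the for-loop of Source B: pop an index, write the value there, rotate the index queue
def pvFill : List Int → List Nat → List Int → List Int
  | [], _, res => res
  | _ :: _, [], res => res   -- unreachable: the index queue has exactly one index per value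
  | v :: vs, i :: q, res =>
      let res' := res.set i v
      let q' := match q with
        | [] => []
        | j :: rest => rest ++ [j]
      pvFill vs q' res'

def arrangePerformers_alt (nums : List Int) : List Int :=
  let s := PySem.List.sorted nums (fun x => x) false
  let n := s.length
  pvFill s (List.range n) (List.replicate n 0)

-- ===== PRECONDITION & SPEC =====
def Spec_arrangePerformers (nums : List Int) (out : List Int) : Prop := out = arrangePerformers_alt nums
instance (nums : List Int) (out : List Int) : Decidable (Spec_arrangePerformers nums out) := by unfold Spec_arrangePerformers; infer_instance

-- ===== CLAIM (what is proved, stated in full; the proofs are below) =====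
def Claim_equal_arrangePerformers : Prop := ∀ (nums : List Int), Dom_arrangePerformers nums → Spec_arrangePerformers nums (arrangePerformers nums)

-- ===== LEMMAS AND PROOFS =====

-- rotate a queue: move the head to the back
def pvRotl {α : Type} : List α → List α
  | [] => []
  | j :: rest => rest ++ [j]

theorem length_pvRotl {α : Type} (q : List α) : (pvRotl q).length = q.length := by
  cases q <;> simp [pvRotl]

-- the sequence of positions popped from the index queue
def pvPos : List Nat → List Nat
  | [] => []
  | i :: q => i :: pvPos (pvRotl q)
termination_by q => q.length
decreasing_by simp [length_pvRotl]

theorem pvRotl_map {α β : Type} (f : α → β) (q : List α) :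
    pvRotl (q.map f) = (pvRotl q).map f := by
  cases q <;> simp [pvRotl]

theorem pvPos_map (f : Nat → Nat) (q : List Nat) :
    pvPos (q.map f) = (pvPos q).map f := by
  induction q using pvPos.induct with
  | case1 => simp [pvPos]
  | case2 i q ih => rw [List.map_cons, pvPos, pvPos, pvRotl_map, ih, List.map_cons]

theorem pvRotl_perm {α : Type} (q : List α) : (pvRotl q).Perm q := by
  cases q with
  | nil => simp [pvRotl]
  | cons j rest => simpa [pvRotl] using List.perm_append_singleton j rest

theorem pvPos_perm (q : List Nat) : (pvPos q).Perm q := by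
  induction q using pvPos.induct with
  | case1 => simp [pvPos]
  | case2 i q ih =>
      rw [pvPos]
      exact (ih.trans (pvRotl_perm q)).cons i

-- the reverse build of A, read as a foldr over the ascending list
def pvBuild (s : List Int) : List Int :=
  s.foldr (fun x acc => x :: (if acc.isEmpty then acc else pvRotA acc)) []

theorem length_pvRotA (l : List Int) : (pvRotA l).length = l.length := by
  cases l with
  | nil => rfl
  | cons a as =>
      unfold pvRotA
      cases h : (a :: as).getLast? with
      | none => simp at h
      | some last => simp

theorem length_pvBuild (s : List Int) : (pvBuild s).length = s.length := by
  induction s with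
  | nil => rfl
  | cons x xs ih =>
      unfold pvBuild at *
      simp only [List.foldr_cons, List.length_cons]
      split
      · rw [ih]
      · rw [length_pvRotA, ih]

theorem pvFill_eq_foldl (vs : List Int) (q : List Nat) (res : List Int) :
    pvFill vs q res
      = (vs.zip (pvPos q)).foldl (fun r p => r.set p.2 p.1) res := by
  induction vs generalizing q res with
  | nil => simp [pvFill]
  | cons v vs ih =>
      cases q with
      | nil => simp [pvFill, pvPos]
      | cons i q =>
          rw [pvPos, List.zip_cons_cons, List.foldl_cons]
          cases q with
          | nil => simp [pvFill, pvRotl, ih [] (res.set i v)]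
          | cons j rest => simp [pvFill, pvRotl, ih (rest ++ [j]) (res.set i v)]

-- the rotated index range, written as a map over the plain range
theorem pvRotl_range_succ (k : Nat) :
    pvRotl ((List.range (k+1)).map (· + 1))
      = (List.range (k+1)).map (fun j => if j = k then 1 else j + 2) := by
  have h1 : (List.range (k+1)).map (· + 1) = 1 :: (List.range k).map (· + 2) := by
    rw [List.range_succ_eq_map, List.map_cons, List.map_map]
    rfl
  have h2 : (List.range (k+1)).map (fun j => if j = k then 1 else j + 2)
      = (List.range k).map (· + 2) ++ [1] := by
    rw [List.range_succ, List.map_append]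
    simp only [List.map_cons, List.map_nil]
    congr 1
    apply List.map_congr_left
    intro j hj
    rw [List.mem_range] at hj
    simp [Nat.ne_of_lt hj]
  rw [h1, h2]
  rfl

theorem foldl_set_cons_shift (L : List (Int × Nat)) (y : Int) (res : List Int) :
    (L.map (Prod.map id (· + 1))).foldl (fun r p => r.set p.2 p.1) (y :: res)
      = y :: L.foldl (fun r p => r.set p.2 p.1) res := by
  induction L generalizing res with
  | nil => rfl
  | cons p L ih => simp [Prod.map, List.set, ih]

theorem getElem?_pvRotA (l : List Int) (i : Nat) (hi : i < l.length) :
    (pvRotA l)[i]? = if i = 0 then l[l.length - 1]? else l[i-1]? := by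
  cases l with
  | nil => simp at hi
  | cons a as =>
      have hne : (a :: as) ≠ [] := by simp
      have hrot : pvRotA (a :: as) = (a :: as).getLast hne :: (a :: as).dropLast := by
        unfold pvRotA
        split
        · simp_all
        · rename_i h'
          rw [List.getLast?_eq_some_getLast hne] at h'
          cases h'
          rfl
      rw [hrot]
      cases i with
      | zero =>
          simp only [reduceIte, List.getElem?_cons_zero]
          rw [List.getLast_eq_getElem]
          rw [List.getElem?_eq_getElem (by omega)]
      | succ j =>
          simp only [Nat.succ_ne_zero, reduceIte, List.getElem?_cons_succ, Nat.add_sub_cancel]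
          rw [List.getElem?_dropLast]
          have hj : j < (a :: as).length - 1 := by simpa using hi
          rw [if_pos hj]

theorem pvRotA_set (l : List Int) (p : Nat) (v : Int) (hp : p < l.length) :
    pvRotA (l.set p v) = (pvRotA l).set (if p = l.length - 1 then 0 else p + 1) v := by
  apply List.ext_getElem?
  intro i
  by_cases hi : i < l.length
  · conv_lhs => rw [getElem?_pvRotA _ i (by simpa using hi)]
    simp only [List.length_set]
    rw [List.getElem?_set, List.getElem?_set]
    conv_rhs => rw [List.getElem?_set]
    rw [getElem?_pvRotA l i hi]
    simp only [length_pvRotA]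
    split_ifs <;> first | rfl | omega
  · have h1 : ((pvRotA (l.set p v))).length ≤ i := by
      rw [length_pvRotA]; simpa using Nat.le_of_not_lt hi
    have h2 : (((pvRotA l).set (if p = l.length - 1 then 0 else p + 1) v)).length ≤ i := by
      rw [List.length_set, length_pvRotA]; exact Nat.le_of_not_lt hi
    rw [List.getElem?_eq_none h1, List.getElem?_eq_none h2]

theorem pvRotA_foldl_set (L : List (Int × Nat)) (res : List Int)
    (hb : ∀ p ∈ L, p.2 < res.length) :
    pvRotA (L.foldl (fun r p => r.set p.2 p.1) res)
      = (L.map (Prod.map id (fun j => if j = res.length - 1 then 0 else j + 1))).foldl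
          (fun r p => r.set p.2 p.1) (pvRotA res) := by
  induction L generalizing res with
  | nil => rfl
  | cons p L ih =>
      obtain ⟨v, q⟩ := p
      simp only [List.foldl_cons, List.map_cons, Prod.map, id]
      rw [← pvRotA_set res q v (hb (v, q) (by simp))]
      have := ih (res.set q v) (by
        intro p hp
        rw [List.length_set]
        exact hb p (List.mem_cons_of_mem _ hp))
      simpa [List.length_set] using this

theorem pvRotA_replicate (m : Nat) : pvRotA (List.replicate m (0 : Int)) = List.replicate m 0 := by
  cases m with
  | zero => rfl
  | succ k =>
      apply List.ext_getElem?
      intro i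
      by_cases hi : i < k + 1
      · rw [getElem?_pvRotA _ i (by simpa using hi)]
        simp only [List.length_replicate]
        rw [List.getElem?_replicate, List.getElem?_replicate, List.getElem?_replicate]
        split_ifs <;> first | rfl | omega
      · rw [List.getElem?_eq_none (by rw [length_pvRotA]; simpa using Nat.le_of_not_lt hi),
            List.getElem?_eq_none (by simpa using Nat.le_of_not_lt hi)]

theorem pvBuild_cons_of_ne (x : Int) (xs : List Int) (h : pvBuild xs ≠ []) :
    pvBuild (x :: xs) = x :: pvRotA (pvBuild xs) := by
  unfold pvBuild at *
  rw [List.foldr_cons]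
  split
  · rename_i hc
    exact absurd (List.isEmpty_iff.mp hc) h
  · rfl

theorem pvFill_range_eq_build (s : List Int) :
    pvFill s (List.range s.length) (List.replicate s.length 0) = pvBuild s := by
  induction s with
  | nil => rfl
  | cons x xs ih =>
      cases xs with
      | nil => rfl
      | cons y ys =>
          have hmlen : (y :: ys).length = ys.length + 1 := rfl
          -- left side: expose the position sequence
          rw [pvFill_eq_foldl]
          have hrange : List.range ((x :: y :: ys).length)
              = 0 :: (List.range (ys.length + 1)).map (· + 1) := by
            rw [List.length_cons, hmlen, List.range_succ_eq_map]
          rw [hrange, pvPos, pvRotl_range_succ, pvPos_map]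
          have hg : (fun j => if j = ys.length then 1 else j + 2)
              = (fun j => j + 1) ∘ (fun j => if j = ys.length then 0 else j + 1) := by
            funext j; by_cases h : j = ys.length <;> simp [h]
          rw [hg, ← List.map_map]
          have hrep : List.replicate ((x :: y :: ys).length) (0 : Int)
              = 0 :: List.replicate (ys.length + 1) 0 := rfl
          rw [hrep]
          rw [show ((x :: y :: ys).zip
                (0 :: ((pvPos (List.range (ys.length + 1))).map
                  (fun j => if j = ys.length then 0 else j + 1)).map (· + 1)))
              = (x, 0) :: ((y :: ys).zip
                (((pvPos (List.range (ys.length + 1))).map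
                  (fun j => if j = ys.length then 0 else j + 1)).map (· + 1))) from rfl]
          rw [List.foldl_cons]
          rw [show ((0 : Int) :: List.replicate (ys.length + 1) 0).set 0 x
              = x :: List.replicate (ys.length + 1) 0 from rfl]
          rw [List.zip_map_right, foldl_set_cons_shift]
          -- right side
          have hne : pvBuild (y :: ys) ≠ [] := by
            intro h
            have := length_pvBuild (y :: ys)
            rw [h] at this
            simp at this
          rw [pvBuild_cons_of_ne x (y :: ys) hne, ← ih, pvFill_eq_foldl]
          have hbound : ∀ p ∈ (y :: ys).zip (pvPos (List.range ((y :: ys).length))),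
              p.2 < (List.replicate ((y :: ys).length) (0 : Int)).length := by
            intro p hp
            have h2 := (List.of_mem_zip hp).2
            have := (pvPos_perm (List.range ((y :: ys).length))).mem_iff.mp h2
            rw [List.mem_range] at this
            simpa using this
          rw [pvRotA_foldl_set _ _ hbound, pvRotA_replicate, List.zip_map_right]
          simp [hmlen]

-- ===== VERDICT (by name: the statement is the Claim_ definition above) =====
theorem arrangePerformers_spec : Claim_equal_arrangePerformers := by
  intro nums _
  show _ = _
  unfold arrangePerformers arrangePerformers_alt
  dsimp only
  rw [PySem.List.slice?_none_none_neg_one]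
  simp only [Option.getD_some]
  rw [List.foldl_reverse, pvFill_range_eq_build, pvBuild]
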